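-- pv_equiv track=rewrite | github.com/orlantquijada/alliance-api | backend/users/choices.py | status_points_map
-- ===== SOURCE A (Python) =====
-- TOW_LIST = ('tow', 'Tow')
--
-- COLLISION_LIST = ('collision', 'Collision')
--
-- CLAMP_LIST = ('clamp', 'Clamp')
--
-- TRAFFIC_VIOLATION_LIST = ('speeding', 'illegal parking',
--                           'illegal right turn', 'illegal left turn', 'no helment', 'no license')
--
-- def status_points_map(val):
--     for t in TOW_LIST:
--         if t in val:
--             return 3
--
--     for c in COLLISION_LIST:
--         if c in val:
--             return 2
--
--     for c in CLAMP_LIST: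
--         if c in val:
--             return 2
--
--     for t in TRAFFIC_VIOLATION_LIST:
--         if t in val:
--             return 1
--
--     return 0
-- ===== SOURCE B (Python) =====
-- TOW_LIST = ('tow', 'Tow')
--
-- COLLISION_LIST = ('collision', 'Collision')
--
-- CLAMP_LIST = ('clamp', 'Clamp')
--
-- TRAFFIC_VIOLATION_LIST = ('speeding', 'illegal parking',
--                           'illegal right turn', 'illegal left turn', 'no helment', 'no license')
--
-- POINTS_TABLE = [
--     (TOW_LIST, 3),
--     (COLLISION_LIST, 2),
--     (CLAMP_LIST, 2),
--     (TRAFFIC_VIOLATION_LIST, 1),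
-- ]
--
--
-- def status_points_map(val):
--     best = 0
--     for subs, pts in POINTS_TABLE:
--         if any(s in val for s in subs):
--             best = max(best, pts)
--     return best
-- ===== Notes on version B (the rewrite author's own statement) =====
-- stated objective: alternative
-- what changed: Replaces the four sequential early-return scan loops with one data-driven pass over a (substring-group, points) table that records the maximum points over ALL matching groups (correct because points are non-increasing in the original scan order).
import Mathlib
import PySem

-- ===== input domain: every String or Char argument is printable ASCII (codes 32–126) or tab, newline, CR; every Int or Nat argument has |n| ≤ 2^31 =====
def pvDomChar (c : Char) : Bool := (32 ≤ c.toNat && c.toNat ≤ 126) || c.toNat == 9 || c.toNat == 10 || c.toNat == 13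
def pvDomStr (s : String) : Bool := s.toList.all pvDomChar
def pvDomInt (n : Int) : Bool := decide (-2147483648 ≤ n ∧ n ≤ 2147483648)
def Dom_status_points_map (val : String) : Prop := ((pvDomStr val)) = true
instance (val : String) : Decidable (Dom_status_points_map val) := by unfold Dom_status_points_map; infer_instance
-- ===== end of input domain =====

-- B replaces A's four early-return scan loops by one max-fold over a (group, points) table; same results, alternative decomposition.

-- ===== PORT A =====
def TOW_LIST : List String := ["tow", "Tow"]
def COLLISION_LIST : List String := ["collision", "Collision"]
def CLAMP_LIST : List String := ["clamp", "Clamp"]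
def TRAFFIC_VIOLATION_LIST : List String :=
  ["speeding", "illegal parking", "illegal right turn", "illegal left turn", "no helment", "no license"]

-- each 'for … : if t in val: return k' loop is the early-exit scan 'if any member is in val, return k'
def status_points_map (val : String) : Int :=
  if TOW_LIST.any (fun t => PySem.Str.isIn t val) then 3
  else if COLLISION_LIST.any (fun c => PySem.Str.isIn c val) then 2
  else if CLAMP_LIST.any (fun c => PySem.Str.isIn c val) then 2
  else if TRAFFIC_VIOLATION_LIST.any (fun t => PySem.Str.isIn t val) then 1
  else 0

-- ===== PORT B =====
def POINTS_TABLE : List (List String × Int) :=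
  [(TOW_LIST, 3), (COLLISION_LIST, 2), (CLAMP_LIST, 2), (TRAFFIC_VIOLATION_LIST, 1)]

def status_points_map_alt (val : String) : Int :=
  POINTS_TABLE.foldl
    (fun best g => if g.1.any (fun s => PySem.Str.isIn s val) then max best g.2 else best) 0

-- ===== PRECONDITION & SPEC =====
def Spec_status_points_map (val : String) (out : Int) : Prop := out = status_points_map_alt val
instance (val : String) (out : Int) : Decidable (Spec_status_points_map val out) := by unfold Spec_status_points_map; infer_instance

-- ===== CLAIM (what is proved, stated in full; the proofs are below) =====
def Claim_equal_status_points_map : Prop := ∀ (val : String), Dom_status_points_map val → Spec_status_points_map val (status_points_map val)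

-- ===== LEMMAS AND PROOFS =====

-- ===== VERDICT (by name: the statement is the Claim_ definition above) =====
theorem status_points_map_spec : Claim_equal_status_points_map := by
  intro val _
  unfold Spec_status_points_map status_points_map status_points_map_alt POINTS_TABLE
  simp only [List.foldl]
  split_ifs <;> simp_all
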